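-- pv_equiv track=rewrite | github.com/dawsonblock/Liquid-Hive-Upgrade | src/safety/pre_guard.py | _should_block_request
-- ===== SOURCE A (Python) =====
-- from typing import List, Dict, Any, Tuple
--
-- def _should_block_request(risk_flags: List[str]) -> bool:
--     """Determine if request should be blocked based on risk assessment."""
--
--     # Block high-risk categories immediately
--     high_risk_categories = {"violence", "self_harm", "illegal"}
--
--     for flag in risk_flags:
--         if flag in high_risk_categories:
--             return True
--
--     # Block if multiple moderate risk flags
--     moderate_risk_categories = {"hate_speech", "adult_content"}
--     moderate_flags = [flag for flag in risk_flags if flag in moderate_risk_categories]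
--
--     if len(moderate_flags) >= 2:
--         return True
--
--     return False
-- ===== SOURCE B (Python) =====
-- def _should_block_request(risk_flags):
--     """Single pass: block on any high-risk flag, or on the second moderate flag."""
--     moderate_seen = 0
--     for flag in risk_flags:
--         if flag in ("violence", "self_harm", "illegal"):
--             return True
--         if flag in ("hate_speech", "adult_content"):
--             moderate_seen += 1
--             if moderate_seen >= 2:
--                 return True
--     return False
-- ===== Notes on version B (the rewrite author's own statement) =====
-- stated objective: alternative
-- what changed: Replaced A's two scans (early-return high-risk loop, then a moderate-flag list build plus length check) with one fused pass that keeps a running moderate counter and returns as soon as a high-risk flag or the second moderate flag is seen.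
import Mathlib
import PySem

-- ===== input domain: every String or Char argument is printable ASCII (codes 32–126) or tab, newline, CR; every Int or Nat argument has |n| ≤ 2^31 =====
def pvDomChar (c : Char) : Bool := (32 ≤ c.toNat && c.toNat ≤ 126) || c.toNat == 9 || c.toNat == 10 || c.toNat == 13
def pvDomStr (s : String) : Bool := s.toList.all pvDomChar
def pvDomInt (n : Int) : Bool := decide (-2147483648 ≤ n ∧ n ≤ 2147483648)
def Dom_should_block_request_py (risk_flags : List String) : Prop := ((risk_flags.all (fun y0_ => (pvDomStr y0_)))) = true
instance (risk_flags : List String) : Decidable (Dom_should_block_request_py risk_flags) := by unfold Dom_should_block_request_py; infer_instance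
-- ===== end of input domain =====

-- B fuses A's two scans into one pass with a running moderate counter (alternative decomposition, same cost).

-- ===== PORT A =====
-- early-return loop over risk_flags checking membership in the high-risk set
def pyA_highLoop : List String → Bool
  | [] => false
  | f :: rest =>
    if f == "violence" || f == "self_harm" || f == "illegal" then true
    else pyA_highLoop rest

def should_block_request_py (risk_flags : List String) : Bool :=
  if pyA_highLoop risk_flags then true
  else
    -- moderate_flags list comprehension, then len >= 2 check
    let moderate_flags := risk_flags.filter (fun f => f == "hate_speech" || f == "adult_content")
    if moderate_flags.length ≥ 2 then true else false

-- ===== PORT B =====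
-- single pass carrying the moderate counter
def altLoop : List String → Nat → Bool
  | [], _ => false
  | f :: rest, c =>
    if f == "violence" || f == "self_harm" || f == "illegal" then true
    else if f == "hate_speech" || f == "adult_content" then
      if c + 1 ≥ 2 then true else altLoop rest (c + 1)
    else altLoop rest c

def should_block_request_py_alt (risk_flags : List String) : Bool :=
  altLoop risk_flags 0

-- ===== PRECONDITION & SPEC =====
def Spec_should_block_request_py (risk_flags : List String) (out : Bool) : Prop := out = should_block_request_py_alt risk_flags
instance (risk_flags : List String) (out : Bool) : Decidable (Spec_should_block_request_py risk_flags out) := by unfold Spec_should_block_request_py; infer_instance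

-- ===== CLAIM (what is proved, stated in full; the proofs are below) =====
def Claim_equal_should_block_request_py : Prop := ∀ (risk_flags : List String), Dom_should_block_request_py risk_flags → Spec_should_block_request_py risk_flags (should_block_request_py risk_flags)

-- ===== LEMMAS AND PROOFS =====

theorem altLoop_char (rf : List String) : ∀ c, c ≤ 1 →
    altLoop rf c = (pyA_highLoop rf ||
      decide ((rf.filter (fun f => f == "hate_speech" || f == "adult_content")).length + c ≥ 2)) := by
  induction rf with
  | nil => intro c hc; simp [altLoop, pyA_highLoop]; omega
  | cons f rest ih =>
    intro c hc
    by_cases hh : (f == "violence" || f == "self_harm" || f == "illegal") = true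
    · simp [altLoop, pyA_highLoop, hh]
    · by_cases hm : (f == "hate_speech" || f == "adult_content") = true
      · by_cases hc1 : c = 1
        · subst hc1
          simp [altLoop, pyA_highLoop, hh, hm]
        · have hc0 : c = 0 := by omega
          subst hc0
          rw [show altLoop (f :: rest) 0 = altLoop rest 1 by
            simp [altLoop, hh, hm]]
          rw [ih 1 (by omega)]
          simp [pyA_highLoop, hh, hm]
      · simp only [altLoop, pyA_highLoop, hh, hm, List.filter_cons,
          Bool.false_eq_true, if_false]
        exact ih c hc

-- ===== VERDICT (by name: the statement is the Claim_ definition above) =====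
theorem should_block_request_py_spec : Claim_equal_should_block_request_py := by
  intro rf _
  unfold Spec_should_block_request_py should_block_request_py should_block_request_py_alt
  rw [altLoop_char rf 0 (by omega)]
  by_cases hh : pyA_highLoop rf = true
  · simp [hh]
  · simp only [Bool.not_eq_true] at hh
    simp [hh]
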